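-- pv_equiv track=rewrite | github.com/lokijota/-AdventOfCode2023 | Challenges/ch18/code.py | calculateBoundaries
-- ===== SOURCE A (Python) =====
-- def calculateBoundaries(instructions):
--     boundaries = [0,0,0,0] # top left / bottom right, row-column
--     current = [0,0]
--
--     for instruction in instructions:
--         if instruction[0] == "R":
--             current[1] += instruction[1]
--             if current[1] > boundaries[3]:
--                 boundaries[3] = current[1]
--
--         elif instruction[0] == "L":
--             current[1] -= instruction[1]
--             if current[1] < boundaries[1]:
--                 boundaries[1] = current[1]
--
--         elif instruction[0] == "D":
--             current[0] += instruction[1]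
--             if current[0] > boundaries[2]:
--                 boundaries[2] = current[0]
--
--         elif instruction[0] == "U":
--             current[0] -= instruction[1]
--             if current[0] < boundaries[0]:
--                 boundaries[0] = current[0]
--
--     return boundaries
-- ===== SOURCE B (Python) =====
-- def calculateBoundaries(instructions):
--     # Collect-then-aggregate: record the coordinate reached after each move,
--     # bucketed by direction, then take one min/max per bucket at the end.
--     r = c = 0
--     ups, lefts, downs, rights = [0], [0], [0], [0]
--     for d, n in instructions:
--         if d == "R":
--             c += n
--             rights.append(c)
--         elif d == "L":
--             c -= n
--             lefts.append(c)
--         elif d == "D":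
--             r += n
--             downs.append(r)
--         elif d == "U":
--             r -= n
--             ups.append(r)
--     return [min(ups), min(lefts), max(downs), max(rights)]
-- ===== Notes on version B (the rewrite author's own statement) =====
-- stated objective: alternative
-- what changed: B separates path-walking from bound-computation: it records the coordinate reached after each move in a per-direction bucket and takes a single min/max per bucket at the end, instead of A's four inline conditional bound updates.
import Mathlib
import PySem

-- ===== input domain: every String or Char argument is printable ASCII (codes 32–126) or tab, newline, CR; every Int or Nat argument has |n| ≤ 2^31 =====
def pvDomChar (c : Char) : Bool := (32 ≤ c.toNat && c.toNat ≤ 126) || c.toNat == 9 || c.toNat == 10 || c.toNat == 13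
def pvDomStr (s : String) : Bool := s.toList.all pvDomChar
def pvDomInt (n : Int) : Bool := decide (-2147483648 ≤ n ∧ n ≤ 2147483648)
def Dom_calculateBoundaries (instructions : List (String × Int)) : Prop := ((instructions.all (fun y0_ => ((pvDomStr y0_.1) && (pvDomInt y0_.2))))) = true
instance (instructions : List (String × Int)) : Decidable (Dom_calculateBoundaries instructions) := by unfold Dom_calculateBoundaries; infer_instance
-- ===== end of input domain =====

-- B replaces A's four inline conditional bound updates by a collect-then-aggregate
-- decomposition (per-direction position buckets, one min/max each at the end); alternative, same cost.

-- ===== PORT A =====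
-- loop over instructions carrying (boundaries, current) state, exactly as A's for-loop
def calcA : List (String × Int) → (Int × Int × Int × Int) → (Int × Int) → List Int
  | [], (b0, b1, b2, b3), _ => [b0, b1, b2, b3]
  | (d, n) :: rest, (b0, b1, b2, b3), (r, c) =>
    if d == "R" then
      calcA rest (b0, b1, b2, if c + n > b3 then c + n else b3) (r, c + n)
    else if d == "L" then
      calcA rest (b0, if c - n < b1 then c - n else b1, b2, b3) (r, c - n)
    else if d == "D" then
      calcA rest (b0, b1, if r + n > b2 then r + n else b2, b3) (r + n, c)
    else if d == "U" then
      calcA rest ((if r - n < b0 then r - n else b0), b1, b2, b3) (r - n, c)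
    else
      calcA rest (b0, b1, b2, b3) (r, c)

def calculateBoundaries (instructions : List (String × Int)) : List Int :=
  calcA instructions (0, 0, 0, 0) (0, 0)

-- ===== PORT B =====
-- walk the path from (r, c), bucketing the coordinate reached after each move by direction:
-- returns (ups, lefts, downs, rights) in visit order (the initial 0 of each bucket is added at the end)
def walkB : Int → Int → List (String × Int) → List Int × List Int × List Int × List Int
  | _, _, [] => ([], [], [], [])
  | r, c, (d, n) :: rest =>
    if d == "R" then
      let (u, l, dn, rt) := walkB r (c + n) rest
      (u, l, dn, (c + n) :: rt)
    else if d == "L" then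
      let (u, l, dn, rt) := walkB r (c - n) rest
      (u, (c - n) :: l, dn, rt)
    else if d == "D" then
      let (u, l, dn, rt) := walkB (r + n) c rest
      (u, l, (r + n) :: dn, rt)
    else if d == "U" then
      let (u, l, dn, rt) := walkB (r - n) c rest
      ((r - n) :: u, l, dn, rt)
    else
      walkB r c rest

def calculateBoundaries_alt (instructions : List (String × Int)) : List Int :=
  let (u, l, dn, rt) := walkB 0 0 instructions
  [u.foldl min 0, l.foldl min 0, dn.foldl max 0, rt.foldl max 0]

-- ===== PRECONDITION & SPEC =====
def Spec_calculateBoundaries (instructions : List (String × Int)) (out : List Int) : Prop := out = calculateBoundaries_alt instructions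
instance (instructions : List (String × Int)) (out : List Int) : Decidable (Spec_calculateBoundaries instructions out) := by unfold Spec_calculateBoundaries; infer_instance

-- ===== CLAIM (what is proved, stated in full; the proofs are below) =====
def Claim_equal_calculateBoundaries : Prop := ∀ (instructions : List (String × Int)), Dom_calculateBoundaries instructions → Spec_calculateBoundaries instructions (calculateBoundaries instructions)

-- ===== LEMMAS AND PROOFS =====

theorem calcA_eq_walkB (instrs : List (String × Int)) :
    ∀ (b0 b1 b2 b3 r c : Int),
      calcA instrs (b0, b1, b2, b3) (r, c) =
        ((walkB r c instrs).1.foldl min b0) ::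
        ((walkB r c instrs).2.1.foldl min b1) ::
        ((walkB r c instrs).2.2.1.foldl max b2) ::
        ((walkB r c instrs).2.2.2.foldl max b3) :: [] := by
  induction instrs with
  | nil => intro b0 b1 b2 b3 r c; simp [calcA, walkB]
  | cons hd rest ih =>
    intro b0 b1 b2 b3 r c
    obtain ⟨d, n⟩ := hd
    by_cases hR : d == "R"
    · simp [calcA, walkB, hR, ih, max_def]
      congr 1; omega
    · by_cases hL : d == "L"
      · simp [calcA, walkB, hR, hL, ih, min_def]
        congr 1; omega
      · by_cases hD : d == "D"
        · simp [calcA, walkB, hR, hL, hD, ih, max_def]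
          congr 1; omega
        · by_cases hU : d == "U"
          · simp [calcA, walkB, hR, hL, hD, hU, ih, min_def]
            congr 1; omega
          · simp [calcA, walkB, hR, hL, hD, hU, ih]

-- ===== VERDICT (by name: the statement is the Claim_ definition above) =====
theorem calculateBoundaries_spec : Claim_equal_calculateBoundaries := by
  intro instructions _
  unfold Spec_calculateBoundaries calculateBoundaries calculateBoundaries_alt
  rw [calcA_eq_walkB]
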